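-- pv_equiv track=rewrite | github.com/Sunil1993/python-projects | SEM3HW2/perceptron.py | selectFilePath
-- ===== SOURCE A (Python) =====
-- def selectFilePath(posDecPaths, posTruPaths, negDecPaths, negTruPaths, index):
--     if index == 0 and len(posDecPaths) > 0:
--         return 1, -1, posDecPaths.pop()
--     elif index == 1 and len(negDecPaths) > 0:
--         return -1, -1, negDecPaths.pop()
--     elif index == 2 and len(posTruPaths) > 0:
--         return 1, 1, posTruPaths.pop()
--     elif index == 3 and len(negTruPaths) > 0:
--         return -1, 1, negTruPaths.pop()
--     else:
--         return selectFilePath(posDecPaths, posTruPaths, negDecPaths, negTruPaths, (index + 1) % 4)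
-- ===== SOURCE B (Python) =====
-- def selectFilePath(posDecPaths, posTruPaths, negDecPaths, negTruPaths, index):
--     table = {0: (1, -1, posDecPaths),
--              1: (-1, -1, negDecPaths),
--              2: (1, 1, posTruPaths),
--              3: (-1, 1, negTruPaths)}
--     while True:
--         entry = table.get(index)
--         if entry is not None and entry[2]:
--             l1, l2, lst = entry
--             return l1, l2, lst.pop()
--         index = (index + 1) % 4
-- ===== Notes on version B (the rewrite author's own statement) =====
-- stated objective: idiomatic
-- what changed: Replaces the recursive four-branch if/elif cascade by a dispatch table keyed on the raw index plus a plain while-loop that normalizes the index and pops from the selected list.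
import Mathlib
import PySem

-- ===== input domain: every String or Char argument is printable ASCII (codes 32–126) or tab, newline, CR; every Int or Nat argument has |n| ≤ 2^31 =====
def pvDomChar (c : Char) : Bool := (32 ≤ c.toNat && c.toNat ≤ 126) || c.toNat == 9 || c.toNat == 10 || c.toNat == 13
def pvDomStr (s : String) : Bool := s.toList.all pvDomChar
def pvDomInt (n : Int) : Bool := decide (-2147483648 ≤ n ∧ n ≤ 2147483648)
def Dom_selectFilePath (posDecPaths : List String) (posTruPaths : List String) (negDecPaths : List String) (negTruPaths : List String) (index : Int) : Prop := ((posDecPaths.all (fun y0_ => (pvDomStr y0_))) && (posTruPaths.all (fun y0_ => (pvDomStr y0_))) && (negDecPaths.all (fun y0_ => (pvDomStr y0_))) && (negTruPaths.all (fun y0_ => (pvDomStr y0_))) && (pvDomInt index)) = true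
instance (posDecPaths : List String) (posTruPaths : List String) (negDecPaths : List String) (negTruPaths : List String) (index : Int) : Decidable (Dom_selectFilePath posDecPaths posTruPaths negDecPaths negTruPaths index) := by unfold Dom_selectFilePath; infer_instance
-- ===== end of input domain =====

-- B replaces A's recursive if-cascade by a dispatch table keyed on the raw index plus a plain loop
-- (objective: idiomatic). Both A and B pop from the argument lists in place; the equivalence proved
-- here is about the return value only (the popped element is the same one in both).
-- Both ports use a fuel counter (6) that only makes the shared loop total; inside Pre_ it is never exhausted.

-- ===== PORT A =====
def selectFilePathFuelA : Nat → List String → List String → List String → List String → Int → Int × Int × String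
  | 0, _, _, _, _, _ => (0, 0, "")
  | fuel+1, pd, pt, nd, nt, index =>
    if index = 0 ∧ pd ≠ [] then (1, -1, pd.getLast?.getD "")
    else if index = 1 ∧ nd ≠ [] then (-1, -1, nd.getLast?.getD "")
    else if index = 2 ∧ pt ≠ [] then (1, 1, pt.getLast?.getD "")
    else if index = 3 ∧ nt ≠ [] then (-1, 1, nt.getLast?.getD "")
    else selectFilePathFuelA fuel pd pt nd nt (PySem.Int.mod (index + 1) 4)

def selectFilePath (posDecPaths : List String) (posTruPaths : List String) (negDecPaths : List String) (negTruPaths : List String) (index : Int) : Int × Int × String :=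
  selectFilePathFuelA 6 posDecPaths posTruPaths negDecPaths negTruPaths index

-- ===== PORT B =====
def selectFilePathAltLoop : Nat → PySem.Dict Int (Int × Int × List String) → Int → Int × Int × String
  | 0, _, _ => (0, 0, "")
  | fuel+1, table, index =>
    match PySem.Dict.get? table index with
    | some (l1, l2, lst) =>
        if lst ≠ [] then (l1, l2, lst.getLast?.getD "")
        else selectFilePathAltLoop fuel table (PySem.Int.mod (index + 1) 4)
    | none => selectFilePathAltLoop fuel table (PySem.Int.mod (index + 1) 4)

def selectFilePath_alt (posDecPaths : List String) (posTruPaths : List String) (negDecPaths : List String) (negTruPaths : List String) (index : Int) : Int × Int × String :=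
  let table : PySem.Dict Int (Int × Int × List String) :=
    PySem.Dict.ofList [(0, (1, -1, posDecPaths)), (1, (-1, -1, negDecPaths)),
                       (2, (1, 1, posTruPaths)), (3, (-1, 1, negTruPaths))]
  selectFilePathAltLoop 6 table index

-- ===== PRECONDITION & SPEC =====
-- Pre_ excludes only the input where all four lists are empty: there Python A raises RecursionError
-- (and Python B loops forever), so A returns on exactly the inputs admitted here.
def Pre_selectFilePath (posDecPaths : List String) (posTruPaths : List String) (negDecPaths : List String) (negTruPaths : List String) (index : Int) : Prop :=
  posDecPaths ≠ [] ∨ posTruPaths ≠ [] ∨ negDecPaths ≠ [] ∨ negTruPaths ≠ []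
instance (posDecPaths : List String) (posTruPaths : List String) (negDecPaths : List String) (negTruPaths : List String) (index : Int) : Decidable (Pre_selectFilePath posDecPaths posTruPaths negDecPaths negTruPaths index) := by unfold Pre_selectFilePath; infer_instance

def pvWitness_selectFilePath : List String × List String × List String × List String × Int := (["a"], [], [], [], 0)

def Spec_selectFilePath (posDecPaths : List String) (posTruPaths : List String) (negDecPaths : List String) (negTruPaths : List String) (index : Int) (out : Int × Int × String) : Prop := out = selectFilePath_alt posDecPaths posTruPaths negDecPaths negTruPaths index
instance (posDecPaths : List String) (posTruPaths : List String) (negDecPaths : List String) (negTruPaths : List String) (index : Int) (out : Int × Int × String) : Decidable (Spec_selectFilePath posDecPaths posTruPaths negDecPaths negTruPaths index out) := by unfold Spec_selectFilePath; infer_instance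

-- ===== CLAIM (what is proved, stated in full; the proofs are below) =====
def Claim_equal_selectFilePath : Prop := ∀ (posDecPaths : List String) (posTruPaths : List String) (negDecPaths : List String) (negTruPaths : List String) (index : Int), Dom_selectFilePath posDecPaths posTruPaths negDecPaths negTruPaths index → Pre_selectFilePath posDecPaths posTruPaths negDecPaths negTruPaths index → Spec_selectFilePath posDecPaths posTruPaths negDecPaths negTruPaths index (selectFilePath posDecPaths posTruPaths negDecPaths negTruPaths index)

-- ===== LEMMAS AND PROOFS =====

lemma table_get (pd pt nd nt : List String) (i : Int) :
  PySem.Dict.get? (PySem.Dict.ofList [(0, (1, -1, pd)), (1, (-1, -1, nd)), (2, (1, 1, pt)), (3, (-1, 1, nt))]) i =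
    if i = 0 then some ((1:Int), (-1:Int), pd) else if i = 1 then some (-1, -1, nd)
    else if i = 2 then some (1, 1, pt) else if i = 3 then some (-1, 1, nt) else none := by
  have h : (PySem.Dict.ofList [(0, (1, -1, pd)), (1, (-1, -1, nd)), (2, (1, 1, pt)), (3, (-1, 1, nt))] : PySem.Dict Int (Int × Int × List String)) = PySem.Dict.mk [(0, (1, -1, pd)), (1, (-1, -1, nd)), (2, (1, 1, pt)), (3, (-1, 1, nt))] := rfl
  rw [h]
  simp only [PySem.Dict.get?_mk_cons]
  by_cases h0 : i = 0
  · simp [h0]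
  · by_cases h1 : i = 1
    · simp [h1]
    · by_cases h2 : i = 2
      · simp [h2]
      · by_cases h3 : i = 3
        · simp [h3]
        · simp [h0, h1, h2, h3, Ne.symm h0, Ne.symm h1, Ne.symm h2, Ne.symm h3, PySem.Dict.get?]

lemma loop_eq (fuel : Nat) (pd pt nd nt : List String) (index : Int) :
    selectFilePathFuelA fuel pd pt nd nt index =
    selectFilePathAltLoop fuel
      (PySem.Dict.ofList [(0, (1, -1, pd)), (1, (-1, -1, nd)), (2, (1, 1, pt)), (3, (-1, 1, nt))]) index := by
  induction fuel generalizing index with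
  | zero => rfl
  | succ n ih =>
    simp only [selectFilePathFuelA, selectFilePathAltLoop, table_get]
    by_cases h0 : index = 0
    case pos =>
      subst h0
      rcases eq_or_ne pd [] with h | h
      · subst h; simp [ih]
      · simp [h]
    case neg =>
    by_cases h1 : index = 1
    case pos =>
      subst h1
      rcases eq_or_ne nd [] with h | h
      · subst h; simp [ih]
      · simp [h]
    case neg =>
    by_cases h2 : index = 2
    case pos =>
      subst h2
      rcases eq_or_ne pt [] with h | h
      · subst h; simp [ih]
      · simp [h]
    case neg =>
    by_cases h3 : index = 3
    case pos =>
      subst h3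
      rcases eq_or_ne nt [] with h | h
      · subst h; simp [ih]
      · simp [h]
    case neg =>
      simp [h0, h1, h2, h3, ih]

-- ===== VERDICT (by name: the statement is the Claim_ definition above) =====
theorem selectFilePath_spec : Claim_equal_selectFilePath := by
  intro pd pt nd nt index _ _
  unfold Spec_selectFilePath selectFilePath selectFilePath_alt
  exact loop_eq 6 pd pt nd nt index
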